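-- pv_equiv track=rewrite | github.com/victor-souza1997/ceg4n-experiments-tcad | code/src/ceg4n/verifier/esbmc.py | _verification_status
-- ===== SOURCE A (Python) =====
-- def _verification_status(lines):
--     property_violated = False
--     counter_example = False
--     not_equivalent = False
--     verification_failed = False
--
--     for line in lines:
--         property_violated = property_violated or "Violated property" in line
--         counter_example = counter_example or "Counterexample" in line
--         not_equivalent = not_equivalent or "Networks not equivalent." in line
--         verification_failed = verification_failed or "VERIFICATION FAILED" in line
--
--     return (
--         property_violated
--         and counter_example
--         and not_equivalent
--         and verification_failed
--     )
-- ===== SOURCE B (Python) =====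
-- def _verification_status(lines):
--     lines = list(lines)
--     return (
--         any("Violated property" in line for line in lines)
--         and any("Counterexample" in line for line in lines)
--         and any("Networks not equivalent." in line for line in lines)
--         and any("VERIFICATION FAILED" in line for line in lines)
--     )
-- ===== Notes on version B (the rewrite author's own statement) =====
-- stated objective: simpler
-- what changed: Replaces A's single fused loop carrying four boolean accumulators with four independent short-circuiting any(...) passes, one per target substring.
import Mathlib
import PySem

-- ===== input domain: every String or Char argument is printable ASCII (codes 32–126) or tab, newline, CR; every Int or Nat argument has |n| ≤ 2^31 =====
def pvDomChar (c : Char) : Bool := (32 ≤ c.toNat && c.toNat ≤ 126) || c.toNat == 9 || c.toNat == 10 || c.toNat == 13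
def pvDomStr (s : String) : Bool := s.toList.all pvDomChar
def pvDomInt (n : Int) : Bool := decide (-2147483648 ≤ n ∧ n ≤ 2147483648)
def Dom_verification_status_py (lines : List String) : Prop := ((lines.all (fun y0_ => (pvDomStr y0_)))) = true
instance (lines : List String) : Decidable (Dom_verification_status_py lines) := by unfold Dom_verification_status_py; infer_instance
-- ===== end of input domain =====

-- ===== PORT A =====
-- Fused single loop over lines carrying four boolean accumulators (A's structure).
def verification_status_py (lines : List String) : Bool :=
  let st := lines.foldl
    (fun (st : Bool × Bool × Bool × Bool) line =>
      (st.1 || PySem.Str.isIn "Violated property" line,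
       st.2.1 || PySem.Str.isIn "Counterexample" line,
       st.2.2.1 || PySem.Str.isIn "Networks not equivalent." line,
       st.2.2.2 || PySem.Str.isIn "VERIFICATION FAILED" line))
    (false, false, false, false)
  st.1 && st.2.1 && st.2.2.1 && st.2.2.2

-- ===== PORT B =====
-- B: four independent short-circuiting passes, one per target substring.
def verification_status_py_alt (lines : List String) : Bool :=
  (lines.any (fun line => PySem.Str.isIn "Violated property" line))
  && (lines.any (fun line => PySem.Str.isIn "Counterexample" line))
  && (lines.any (fun line => PySem.Str.isIn "Networks not equivalent." line))
  && (lines.any (fun line => PySem.Str.isIn "VERIFICATION FAILED" line))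

-- ===== PRECONDITION & SPEC =====
def Spec_verification_status_py (lines : List String) (out : Bool) : Prop := out = verification_status_py_alt lines
instance (lines : List String) (out : Bool) : Decidable (Spec_verification_status_py lines out) := by unfold Spec_verification_status_py; infer_instance

-- ===== CLAIM (what is proved, stated in full; the proofs are below) =====
def Claim_equal_verification_status_py : Prop := ∀ (lines : List String), Dom_verification_status_py lines → Spec_verification_status_py lines (verification_status_py lines)

-- ===== LEMMAS AND PROOFS =====

-- ===== VERDICT (by name: the statement is the Claim_ definition above) =====
-- Loop invariant: the fused fold's four components are each 'initial or any-pass'.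
theorem fold_components (lines : List String) (p c n v : Bool) :
    lines.foldl
      (fun (st : Bool × Bool × Bool × Bool) line =>
        (st.1 || PySem.Str.isIn "Violated property" line,
         st.2.1 || PySem.Str.isIn "Counterexample" line,
         st.2.2.1 || PySem.Str.isIn "Networks not equivalent." line,
         st.2.2.2 || PySem.Str.isIn "VERIFICATION FAILED" line))
      (p, c, n, v)
    = (p || lines.any (fun line => PySem.Str.isIn "Violated property" line),
       c || lines.any (fun line => PySem.Str.isIn "Counterexample" line),
       n || lines.any (fun line => PySem.Str.isIn "Networks not equivalent." line),
       v || lines.any (fun line => PySem.Str.isIn "VERIFICATION FAILED" line)) := by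
  induction lines generalizing p c n v with
  | nil => simp
  | cons head tail ih => simp only [List.foldl_cons, List.any_cons, ih, Bool.or_assoc]

theorem verification_status_py_spec : Claim_equal_verification_status_py := by
  intro lines _
  unfold Spec_verification_status_py verification_status_py verification_status_py_alt
  simp only [fold_components, Bool.false_or]
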